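-- pv_equiv track=rewrite | github.com/ovidiuostoia/advanced-algorithms | arrays/sliding-window-fixed/sliding-window-variable.py | longestSubarrayBruteForce
-- ===== SOURCE A (Python) =====
-- def longestSubarrayBruteForce(nums: list) -> int:
--     length = 0
--
--     for l in range(len(nums)):
--         for r in range(l, len(nums)):
--             if nums[l] != nums[r]:
--                 break
--             length = max(length, r - l + 1)
--     return length
-- ===== SOURCE B (Python) =====
-- def longestSubarrayBruteForce(nums: list) -> int:
--     best = 0
--     cur = 0
--     prev = None
--     for x in nums:
--         if prev is not None and x == prev:
--             cur += 1
--         else: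
--             cur = 1
--         best = max(best, cur)
--         prev = x
--     return best
-- ===== Notes on version B (the rewrite author's own statement) =====
-- stated objective: faster
-- what changed: Replaced the quadratic start-at-every-index double scan with a single pass that maintains the current run length of equal consecutive elements and the best run seen.
import Mathlib
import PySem

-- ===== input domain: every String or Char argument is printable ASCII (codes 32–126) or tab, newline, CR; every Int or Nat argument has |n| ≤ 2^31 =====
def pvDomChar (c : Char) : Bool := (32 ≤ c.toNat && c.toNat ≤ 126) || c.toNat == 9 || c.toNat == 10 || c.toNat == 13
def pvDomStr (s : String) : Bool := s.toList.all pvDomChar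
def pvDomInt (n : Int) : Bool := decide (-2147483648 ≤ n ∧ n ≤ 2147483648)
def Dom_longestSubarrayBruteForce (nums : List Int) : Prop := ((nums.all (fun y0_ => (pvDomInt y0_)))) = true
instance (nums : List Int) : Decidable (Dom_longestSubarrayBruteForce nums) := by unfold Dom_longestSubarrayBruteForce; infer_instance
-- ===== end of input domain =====

-- B replaces A's quadratic start-at-every-index scan with a single pass tracking the
-- current run of equal consecutive elements (objective: faster, asymptotic).

-- ===== PORT A =====
-- inner 'for r in range(l, len(nums)) … break' loop of A, threading 'length'
def pvInnerA (nums : List Int) (l : Nat) : List Nat → Int → Int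
  | [], length => length
  | r :: rs, length =>
    if nums.getD l 0 ≠ nums.getD r 0 then length
    else pvInnerA nums l rs (max length ((r : Int) - (l : Int) + 1))

def longestSubarrayBruteForce (nums : List Int) : Int :=
  (List.range nums.length).foldl
    (fun length l => pvInnerA nums l ((List.range nums.length).drop l) length) 0

-- ===== PORT B =====
-- single pass: prev element, current run length, best run length
def pvLoopB (prev : Option Int) (cur best : Int) : List Int → Int
  | [] => best
  | x :: xs =>
    let cur' := if prev = some x then cur + 1 else 1
    pvLoopB (some x) cur' (max best cur') xs

def longestSubarrayBruteForce_alt (nums : List Int) : Int :=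
  pvLoopB none 0 0 nums

-- ===== PRECONDITION & SPEC =====
def Spec_longestSubarrayBruteForce (nums : List Int) (out : Int) : Prop := out = longestSubarrayBruteForce_alt nums
instance (nums : List Int) (out : Int) : Decidable (Spec_longestSubarrayBruteForce nums out) := by unfold Spec_longestSubarrayBruteForce; infer_instance

-- ===== CLAIM (what is proved, stated in full; the proofs are below) =====
def Claim_equal_longestSubarrayBruteForce : Prop := ∀ (nums : List Int), Dom_longestSubarrayBruteForce nums → Spec_longestSubarrayBruteForce nums (longestSubarrayBruteForce nums)

-- ===== LEMMAS AND PROOFS =====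

-- reference: length of the prefix of xs whose elements equal x
def runLen (x : Int) : List Int → Int
  | [] => 0
  | y :: ys => if x = y then 1 + runLen x ys else 0

-- reference: longest run of equal consecutive elements
def longRun : List Int → Int
  | [] => 0
  | x :: xs => max (1 + runLen x xs) (longRun xs)

theorem runLen_nonneg (x : Int) (xs : List Int) : 0 ≤ runLen x xs := by
  induction xs with
  | nil => simp [runLen]
  | cons y ys ih => simp only [runLen]; split <;> omega

theorem longRun_nonneg (xs : List Int) : 0 ≤ longRun xs := by
  induction xs with
  | nil => simp [longRun]
  | cons x xs ih =>
    have := runLen_nonneg x xs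
    simp only [longRun]; omega

theorem inner_spec (nums : List Int) (l : Nat) :
    ∀ (k r : Nat) (length : Int), r + k = nums.length →
      (r : Int) - (l : Int) ≤ length →
      pvInnerA nums l (List.range' r k) length
        = max length ((r : Int) - (l : Int) + runLen (nums.getD l 0) (nums.drop r)) := by
  intro k
  induction k with
  | zero =>
    intro r length hr hle
    have : nums.drop r = [] := List.drop_eq_nil_of_le (by omega)
    simp [pvInnerA, this, runLen]
    omega
  | succ k ih =>
    intro r length hr hle
    have hrlt : r < nums.length := by omega
    have hdrop : nums.drop r = nums.getD r 0 :: nums.drop (r + 1) := by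
      rw [List.getD_eq_getElem _ _ hrlt, List.drop_eq_getElem_cons hrlt]
    rw [List.range'_succ]
    simp only [pvInnerA]
    by_cases h : nums.getD l 0 = nums.getD r 0
    · rw [if_neg (not_not_intro h)]
      rw [ih (r + 1) _ (by omega) (by push_cast; omega)]
      rw [hdrop]
      simp only [runLen]
      rw [if_pos h]
      have := runLen_nonneg (nums.getD l 0) (nums.drop (r + 1))
      push_cast
      omega
    · simp only [ne_eq, h, not_false_iff, if_true]
      rw [hdrop]
      simp only [runLen, h, if_false]
      have h0 := runLen_nonneg (nums.getD l 0) (nums.drop r)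
      omega

theorem outer_spec (nums : List Int) :
    ∀ (xs : List Int) (l : Nat) (init : Int), nums.drop l = xs → 0 ≤ init →
      (List.range' l xs.length).foldl
        (fun length l => pvInnerA nums l ((List.range nums.length).drop l) length) init
        = max init (longRun xs) := by
  intro xs
  induction xs with
  | nil =>
    intro l init _ h0
    simp [longRun]
    omega
  | cons x xs ih =>
    intro l init hdrop h0
    have hlt : l < nums.length := by
      by_contra h
      have : nums.drop l = [] := List.drop_eq_nil_of_le (by omega)
      simp [this] at hdrop
    have hcons := List.drop_eq_getElem_cons hlt
    rw [hdrop, List.cons.injEq] at hcons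
    obtain ⟨hx, hxs'⟩ := hcons
    have hget : nums.getD l 0 = x := by rw [List.getD_eq_getElem _ _ hlt, ← hx]
    have hdrop' : nums.drop (l + 1) = xs := hxs'.symm
    have hrange : (List.range nums.length).drop l = List.range' l (nums.length - l) := by
      rw [List.range_eq_range', List.drop_range']
      simp
    rw [List.length_cons, List.range'_succ, List.foldl_cons, hrange,
      inner_spec nums l (nums.length - l) l init (by omega) (by omega)]
    rw [hdrop]
    simp only [runLen]
    rw [if_pos hget]
    have h1 := runLen_nonneg (nums.getD l 0) xs
    rw [ih (l + 1) _ hdrop' (le_trans h0 (le_max_left _ _))]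
    simp only [longRun]
    have h2 := longRun_nonneg xs
    rw [hget] at h1 ⊢
    omega

theorem loopB_spec :
    ∀ (xs : List Int) (p cur best : Int), 0 ≤ cur → cur ≤ best →
      pvLoopB (some p) cur best xs
        = max best (max (cur + runLen p xs) (longRun xs)) := by
  intro xs
  induction xs with
  | nil =>
    intro p cur best h0 h1
    simp [pvLoopB, runLen, longRun]
    omega
  | cons x xs ih =>
    intro p cur best h0 h1
    simp only [pvLoopB, runLen, longRun]
    by_cases h : p = x
    · subst h
      rw [if_pos rfl, if_pos rfl]
      rw [ih p (cur + 1) (max best (cur + 1)) (by omega) (le_max_right _ _)]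
      have h2 := runLen_nonneg p xs
      have h3 := longRun_nonneg xs
      omega
    · rw [if_neg (by simpa using h), if_neg h]
      rw [ih x 1 (max best 1) (by omega) (le_max_right _ _)]
      have h2 := runLen_nonneg x xs
      have h3 := longRun_nonneg xs
      omega

theorem portA_eq_longRun (nums : List Int) : longestSubarrayBruteForce nums = longRun nums := by
  unfold longestSubarrayBruteForce
  have h : List.range nums.length = List.range' 0 nums.length := List.range_eq_range'
  have h2 := outer_spec nums nums 0 0 (by simp) le_rfl
  rw [← h] at h2
  rw [h2]
  exact max_eq_right (longRun_nonneg nums)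

theorem portB_eq_longRun (nums : List Int) : longestSubarrayBruteForce_alt nums = longRun nums := by
  unfold longestSubarrayBruteForce_alt
  cases nums with
  | nil => simp [pvLoopB, longRun]
  | cons x xs =>
    simp only [pvLoopB, reduceCtorEq, if_false]
    rw [loopB_spec xs x 1 (max 0 1) (by omega) (by omega)]
    simp only [longRun]
    have h2 := runLen_nonneg x xs
    have h3 := longRun_nonneg xs
    omega

-- ===== VERDICT (by name: the statement is the Claim_ definition above) =====
theorem longestSubarrayBruteForce_spec : Claim_equal_longestSubarrayBruteForce := by
  intro nums _
  unfold Spec_longestSubarrayBruteForce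
  rw [portA_eq_longRun, portB_eq_longRun]
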